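-- pv_equiv track=rewrite | github.com/Rosalia2001/PracticosenClase | Desafio.py | reemplazar_vocales_consonantes
-- ===== SOURCE A (Python) =====
-- def reemplazar_vocales_consonantes(cadena):
--     nueva_cadena = ""
--     for caracter in cadena:
--         if caracter.lower() in "aeiou":
--             nueva_cadena += "8"
--         elif caracter.isalpha():
--             nueva_cadena += "1"
--         else:
--             nueva_cadena += caracter
--     return nueva_cadena
-- ===== SOURCE B (Python) =====
-- def reemplazar_vocales_consonantes(cadena):
--     # Pass 1: vowels -> '8'
--     intermedia = "".join('8' if c.lower() in "aeiou" else c for c in cadena)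
--     # Pass 2: remaining letters (consonants) -> '1'
--     return "".join('1' if c.isalpha() else c for c in intermedia)
-- ===== Notes on version B (the rewrite author's own statement) =====
-- stated objective: alternative
-- what changed: Single accumulator loop with a three-way branch replaced by two sequential whole-string map passes: first pass rewrites vowels, second pass rewrites the remaining alphabetic characters.
import Mathlib
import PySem

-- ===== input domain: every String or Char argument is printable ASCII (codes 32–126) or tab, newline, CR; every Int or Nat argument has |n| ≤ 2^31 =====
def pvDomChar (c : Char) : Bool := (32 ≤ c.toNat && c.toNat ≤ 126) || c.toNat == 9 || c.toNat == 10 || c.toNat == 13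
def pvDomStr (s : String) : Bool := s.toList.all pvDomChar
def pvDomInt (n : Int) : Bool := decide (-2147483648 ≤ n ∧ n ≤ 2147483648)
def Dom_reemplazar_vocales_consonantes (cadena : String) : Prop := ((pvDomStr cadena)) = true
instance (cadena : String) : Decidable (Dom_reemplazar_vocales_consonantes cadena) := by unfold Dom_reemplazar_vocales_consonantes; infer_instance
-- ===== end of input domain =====

-- B replaces A's single three-way accumulator loop by two sequential whole-string map passes (vowels first, then remaining letters); alternative decomposition, same cost.
-- ===== PORT A =====
def reemplazar_vocales_consonantes (cadena : String) : String :=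
  String.ofList (cadena.toList.foldl (fun acc c =>
    if "aeiou".toList.contains (PySem.Chars.lowerChar c) then acc ++ ['8']
    else if PySem.Chars.isalpha c then acc ++ ['1']
    else acc ++ [c]) [])

-- ===== PORT B =====
-- pass 1 of Source B: vowels -> '8'
def pvPass1 (cs : List Char) : List Char :=
  cs.map (fun c => if "aeiou".toList.contains (PySem.Chars.lowerChar c) then '8' else c)

-- pass 2 of Source B: remaining alphabetic characters -> '1'
def pvPass2 (cs : List Char) : List Char :=
  cs.map (fun c => if PySem.Chars.isalpha c then '1' else c)

def reemplazar_vocales_consonantes_alt (cadena : String) : String :=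
  String.ofList (pvPass2 (pvPass1 cadena.toList))

-- ===== PRECONDITION & SPEC =====
def Spec_reemplazar_vocales_consonantes (cadena : String) (out : String) : Prop := out = reemplazar_vocales_consonantes_alt cadena
instance (cadena : String) (out : String) : Decidable (Spec_reemplazar_vocales_consonantes cadena out) := by unfold Spec_reemplazar_vocales_consonantes; infer_instance

-- ===== CLAIM (what is proved, stated in full; the proofs are below) =====
def Claim_equal_reemplazar_vocales_consonantes : Prop := ∀ (cadena : String), Dom_reemplazar_vocales_consonantes cadena → Spec_reemplazar_vocales_consonantes cadena (reemplazar_vocales_consonantes cadena)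

-- ===== LEMMAS AND PROOFS =====
-- A's loop appends the per-character result; characterise it as acc ++ map.
theorem pvFoldA_eq (cs : List Char) (acc : List Char) :
    cs.foldl (fun acc c =>
      if "aeiou".toList.contains (PySem.Chars.lowerChar c) then acc ++ ['8']
      else if PySem.Chars.isalpha c then acc ++ ['1']
      else acc ++ [c]) acc
    = acc ++ cs.map (fun c =>
      if "aeiou".toList.contains (PySem.Chars.lowerChar c) then '8'
      else if PySem.Chars.isalpha c then '1' else c) := by
  induction cs generalizing acc with
  | nil => simp
  | cons c cs ih =>
    rw [List.foldl_cons, ih, List.map_cons]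
    split_ifs <;> simp

-- the two passes of B compose to A's per-character classification
theorem pvPass2_pass1_eq (cs : List Char) :
    pvPass2 (pvPass1 cs) = cs.map (fun c =>
      if "aeiou".toList.contains (PySem.Chars.lowerChar c) then '8'
      else if PySem.Chars.isalpha c then '1' else c) := by
  unfold pvPass1 pvPass2
  rw [List.map_map]
  apply List.map_congr_left
  intro c _
  simp only [Function.comp_apply]
  by_cases h : "aeiou".toList.contains (PySem.Chars.lowerChar c) = true
  · rw [if_pos h, if_pos h]; decide
  · rw [if_neg h, if_neg h]

-- ===== VERDICT (by name: the statement is the Claim_ definition above) =====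
theorem reemplazar_vocales_consonantes_spec : Claim_equal_reemplazar_vocales_consonantes := by
  intro cadena _
  unfold Spec_reemplazar_vocales_consonantes reemplazar_vocales_consonantes reemplazar_vocales_consonantes_alt
  rw [pvFoldA_eq cadena.toList []]
  simp [pvPass2_pass1_eq]
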